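-- pv_equiv track=rewrite | github.com/TLado/ElektromagnesesSugarzas_DigiProjektek | archivált/procedural_room_generation.py | _layout_facing
-- ===== SOURCE A (Python) =====
-- EXPORT_CELL_SIZE_M = 0.25
--
-- DESK_W = 6   # ~1.5 m
--
-- DESK_H = 3   # ~0.75 m
--
-- def meters_to_cells(meters: float) -> int:
--     return max(1, int(round(meters / EXPORT_CELL_SIZE_M)))
--
-- def _layout_facing(n, x_start, x_end, y_start, y_end):
--     """
--     Páros elrendezés: 2 asztal egymással szemben, monitorok középen.
--     Az egyik sor normál irányban, a szemközti 'tükrözve' (de pozíció szintjén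
--     csak az y-t toljuk el egy asztal + kis résnyivel).
--     """
--     positions = []
--     gap_x   = meters_to_cells(0.8)
--     gap_mid = meters_to_cells(0.3)   # monitor-monitor rés középen
--     step_x  = DESK_W + gap_x
--
--     cols = max(1, (x_end - x_start) // step_x)
--     pair_h  = DESK_H * 2 + gap_mid + meters_to_cells(1.5)  # pár magassága
--     mid_y   = y_start + (y_end - y_start) // 2
--
--     desk_index = 0
--     block = 0
--     while desk_index < n:
--         for col in range(cols):
--             if desk_index >= n:
--                 break
--             x = x_start + col * step_x + block * (cols * step_x)
--             pair_top_y    = mid_y - DESK_H - gap_mid // 2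
--             pair_bottom_y = mid_y + gap_mid // 2
--
--             positions.append((x, pair_top_y))
--             desk_index += 1
--             if desk_index >= n:
--                 break
--             positions.append((x, pair_bottom_y))
--             desk_index += 1
--         block += 1
--         if block > 10:
--             break
--     return positions
-- ===== SOURCE B (Python) =====
-- EXPORT_CELL_SIZE_M = 0.25
--
-- DESK_W = 6   # ~1.5 m
--
-- DESK_H = 3   # ~0.75 m
--
-- def meters_to_cells(meters: float) -> int:
--     return max(1, int(round(meters / EXPORT_CELL_SIZE_M)))
--
-- def _layout_facing(n, x_start, x_end, y_start, y_end):
--     # Closed-form flat version: one comprehension over a precomputed desk count.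
--     step_x = DESK_W + meters_to_cells(0.8)
--     cols = max(1, (x_end - x_start) // step_x)
--     gap_mid = meters_to_cells(0.3)
--     mid_y = y_start + (y_end - y_start) // 2
--     top = mid_y - DESK_H - gap_mid // 2
--     bottom = mid_y + gap_mid // 2
--     limit = max(0, min(n, 22 * cols))  # at most 11 blocks of 2*cols desks
--     return [(x_start + (i // 2) * step_x, top if i % 2 == 0 else bottom)
--             for i in range(limit)]
-- ===== Notes on version B (the rewrite author's own statement) =====
-- stated objective: simpler
-- what changed: Replaced the nested while/for loop with mutable desk_index/block counters and break-based termination by a single comprehension over a precomputed desk count limit = max(0, min(n, 22*cols)), with each desk's position derived by index arithmetic (x = x_start + (i//2)*step_x, side = i%2).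
import Mathlib
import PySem

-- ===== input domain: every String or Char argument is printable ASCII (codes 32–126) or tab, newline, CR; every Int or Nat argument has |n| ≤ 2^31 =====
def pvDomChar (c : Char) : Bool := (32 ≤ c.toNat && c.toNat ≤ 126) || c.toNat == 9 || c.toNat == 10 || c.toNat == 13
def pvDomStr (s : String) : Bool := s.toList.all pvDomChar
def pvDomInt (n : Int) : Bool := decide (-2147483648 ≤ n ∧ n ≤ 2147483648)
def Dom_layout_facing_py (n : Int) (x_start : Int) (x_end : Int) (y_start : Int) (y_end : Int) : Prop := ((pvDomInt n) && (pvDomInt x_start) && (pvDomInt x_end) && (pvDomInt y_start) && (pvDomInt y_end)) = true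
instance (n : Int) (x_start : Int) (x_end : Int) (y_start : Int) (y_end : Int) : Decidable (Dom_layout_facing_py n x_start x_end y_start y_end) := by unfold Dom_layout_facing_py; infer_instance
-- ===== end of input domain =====

-- B replaces A's nested while/for with mutable counters and break-based termination by a
-- single comprehension over a precomputed desk count (objective: simpler; same cost).
-- meters_to_cells is a float helper called only on the literals 0.8, 0.3, 1.5; its values
-- 3, 1, 6 are inlined by hand (exact: round(0.8/0.25)=3, round(0.3/0.25)=1, round(1.5/0.25)=6).

-- ===== PORT A =====
-- inner 'for col in range(cols)' loop with its two breaks: recursion over the column list,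
-- returning the updated (positions, desk_index).
def layoutInner (n x_start step_x cols mid_y gap_mid block : Int) :
    List Int → List (Int × Int) → Int → (List (Int × Int) × Int)
  | [], ps, di => (ps, di)
  | col :: rest, ps, di =>
    if di ≥ n then (ps, di)
    else
      let x := x_start + col * step_x + block * (cols * step_x)
      let pair_top_y := mid_y - 3 - PySem.Int.floordiv gap_mid 2
      let pair_bottom_y := mid_y + PySem.Int.floordiv gap_mid 2
      let ps1 := ps ++ [(x, pair_top_y)]
      let di1 := di + 1
      if di1 ≥ n then (ps1, di1)
      else layoutInner n x_start step_x cols mid_y gap_mid block rest (ps1 ++ [(x, pair_bottom_y)]) (di1 + 1)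

-- outer 'while desk_index < n' loop; 'block += 1; if block > 10: break' bounds it by 11
-- iterations, so fuel = 11 - block is structural fuel (the fuel-0 branch is never reached:
-- the break fires first, exactly as in Python).
def layoutOuter (n x_start step_x cols mid_y gap_mid : Int) :
    Nat → List (Int × Int) → Int → Int → List (Int × Int)
  | 0, ps, _, _ => ps
  | fuel + 1, ps, di, block =>
    if di < n then
      let r := layoutInner n x_start step_x cols mid_y gap_mid block (PySem.List.pyRange 0 cols 1) ps di
      let block1 := block + 1
      if block1 > 10 then r.1 else layoutOuter n x_start step_x cols mid_y gap_mid fuel r.1 r.2 block1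
    else ps

def layout_facing_py (n : Int) (x_start : Int) (x_end : Int) (y_start : Int) (y_end : Int) : List (Int × Int) :=
  let gap_x : Int := 3      -- meters_to_cells(0.8)
  let gap_mid : Int := 1    -- meters_to_cells(0.3)
  let step_x : Int := 6 + gap_x
  let cols : Int := max 1 (PySem.Int.floordiv (x_end - x_start) step_x)
  let _pair_h : Int := 3 * 2 + gap_mid + 6   -- computed and unused in A (meters_to_cells(1.5)=6)
  let mid_y : Int := y_start + PySem.Int.floordiv (y_end - y_start) 2
  layoutOuter n x_start step_x cols mid_y gap_mid 11 [] 0 0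

-- ===== PORT B =====
def layout_facing_py_alt (n : Int) (x_start : Int) (x_end : Int) (y_start : Int) (y_end : Int) : List (Int × Int) :=
  let step_x : Int := 6 + 3          -- DESK_W + meters_to_cells(0.8)
  let cols : Int := max 1 (PySem.Int.floordiv (x_end - x_start) step_x)
  let gap_mid : Int := 1             -- meters_to_cells(0.3)
  let mid_y : Int := y_start + PySem.Int.floordiv (y_end - y_start) 2
  let top : Int := mid_y - 3 - PySem.Int.floordiv gap_mid 2
  let bottom : Int := mid_y + PySem.Int.floordiv gap_mid 2
  let limit : Int := max 0 (min n (22 * cols))   -- at most 11 blocks of 2*cols desks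
  (PySem.List.pyRange 0 limit 1).map (fun i =>
    (x_start + PySem.Int.floordiv i 2 * step_x, if PySem.Int.mod i 2 == 0 then top else bottom))

-- ===== PRECONDITION & SPEC =====
def Spec_layout_facing_py (n : Int) (x_start : Int) (x_end : Int) (y_start : Int) (y_end : Int) (out : List (Int × Int)) : Prop := out = layout_facing_py_alt n x_start x_end y_start y_end
instance (n : Int) (x_start : Int) (x_end : Int) (y_start : Int) (y_end : Int) (out : List (Int × Int)) : Decidable (Spec_layout_facing_py n x_start x_end y_start y_end out) := by unfold Spec_layout_facing_py; infer_instance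

-- ===== CLAIM (what is proved, stated in full; the proofs are below) =====
def Claim_equal_layout_facing_py : Prop := ∀ (n : Int) (x_start : Int) (x_end : Int) (y_start : Int) (y_end : Int), Dom_layout_facing_py n x_start x_end y_start y_end → Spec_layout_facing_py n x_start x_end y_start y_end (layout_facing_py n x_start x_end y_start y_end)

-- ===== LEMMAS AND PROOFS =====

-- the position of the i-th desk laid out (B's element function)
def pvG (x_start step_x top bot : Int) (i : Int) : Int × Int :=
  (x_start + PySem.Int.floordiv i 2 * step_x, if PySem.Int.mod i 2 == 0 then top else bot)

-- desks a, a+1, …, b-1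
def pvSeg (x_start step_x top bot : Int) (a b : Int) : List (Int × Int) :=
  (List.range (b - a).toNat).map (fun t : Nat => pvG x_start step_x top bot (a + (t : Int)))

lemma pvSeg_nil (x_start step_x top bot a b : Int) (h : b ≤ a) :
    pvSeg x_start step_x top bot a b = [] := by
  unfold pvSeg
  have : (b - a).toNat = 0 := by omega
  simp [this]

lemma pvSeg_cons (x_start step_x top bot a b : Int) (h : a < b) :
    pvSeg x_start step_x top bot a b
      = pvG x_start step_x top bot a :: pvSeg x_start step_x top bot (a + 1) b := by
  unfold pvSeg
  have : (b - a).toNat = (b - (a + 1)).toNat + 1 := by omega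
  rw [this, List.range_succ_eq_map]
  simp only [List.map_cons, List.map_map, Nat.cast_zero, add_zero]
  refine congrArg _ ?_
  refine List.map_congr_left fun t _ => ?_
  simp only [Function.comp]
  congr 1
  push_cast
  ring

lemma pvSeg_append (x_start step_x top bot a b c : Int) (h1 : a ≤ b) (h2 : b ≤ c) :
    pvSeg x_start step_x top bot a b ++ pvSeg x_start step_x top bot b c
      = pvSeg x_start step_x top bot a c := by
  unfold pvSeg
  have h3 : (c - a).toNat = (b - a).toNat + (c - b).toNat := by omega
  rw [h3, List.range_add, List.map_append, List.map_map]
  refine congrArg _ ?_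
  refine List.map_congr_left fun t _ => ?_
  simp only [Function.comp]
  congr 1
  have : ((b - a).toNat : Int) = b - a := by omega
  push_cast [this]
  ring

lemma floordiv_two_even (m : Int) : PySem.Int.floordiv (2 * m) 2 = m := by
  rw [PySem.Int.floordiv_eq_ediv_of_pos (by norm_num)]; omega

lemma floordiv_two_odd (m : Int) : PySem.Int.floordiv (2 * m + 1) 2 = m := by
  rw [PySem.Int.floordiv_eq_ediv_of_pos (by norm_num)]; omega

lemma mod_two_even (m : Int) : PySem.Int.mod (2 * m) 2 = 0 := by
  rw [PySem.Int.mod_eq_emod_of_pos (by norm_num)]; omega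

lemma mod_two_odd (m : Int) : PySem.Int.mod (2 * m + 1) 2 = 1 := by
  rw [PySem.Int.mod_eq_emod_of_pos (by norm_num)]; omega

-- the inner for-loop lays out desks di, di+1, …, min(n, di+2k)-1 of the flat scheme
lemma inner_spec (n x_start step_x cols mid_y gap_mid block : Int) (k : Nat) :
    ∀ (c : Int) (ps : List (Int × Int)) (di : Int), di = 2 * (block * cols + c) →
    layoutInner n x_start step_x cols mid_y gap_mid block
        ((List.range k).map (fun t : Nat => c + (t : Int))) ps di
      = (ps ++ pvSeg x_start step_x (mid_y - 3 - PySem.Int.floordiv gap_mid 2)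
            (mid_y + PySem.Int.floordiv gap_mid 2) di (min n (di + 2 * (k : Int))),
         max di (min n (di + 2 * (k : Int)))) := by
  induction k with
  | zero =>
    intro c ps di hdi
    simp only [List.range_zero, List.map_nil, layoutInner, Nat.cast_zero, mul_zero, add_zero]
    rw [pvSeg_nil _ _ _ _ _ _ (min_le_right n di), List.append_nil,
      max_eq_left (min_le_right n di)]
  | succ k ih =>
    intro c ps di hdi
    rw [List.range_succ_eq_map, List.map_cons]
    have hlist : (List.map Nat.succ (List.range k)).map (fun t : Nat => c + (t : Int))
        = (List.range k).map (fun t : Nat => (c + 1) + (t : Int)) := by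
      rw [List.map_map]
      refine List.map_congr_left fun t _ => ?_
      simp only [Function.comp, Nat.succ_eq_add_one]
      push_cast
      ring
    rw [hlist]
    simp only [layoutInner, Nat.cast_zero, add_zero]
    by_cases hge : di ≥ n
    · rw [if_pos hge]
      have hm : min n (di + 2 * ((k : Int) + 1)) ≤ di := le_trans (min_le_left _ _) hge
      push_cast
      rw [pvSeg_nil _ _ _ _ _ _ hm, List.append_nil, max_eq_left hm]
    · rw [if_neg hge]
      push_cast
      have hx0 : pvG x_start step_x (mid_y - 3 - PySem.Int.floordiv gap_mid 2)
          (mid_y + PySem.Int.floordiv gap_mid 2) di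
          = (x_start + c * step_x + block * (cols * step_x),
             mid_y - 3 - PySem.Int.floordiv gap_mid 2) := by
        simp only [pvG, hdi, floordiv_two_even, mod_two_even]
        norm_num
        ring
      have hx1 : pvG x_start step_x (mid_y - 3 - PySem.Int.floordiv gap_mid 2)
          (mid_y + PySem.Int.floordiv gap_mid 2) (di + 1)
          = (x_start + c * step_x + block * (cols * step_x),
             mid_y + PySem.Int.floordiv gap_mid 2) := by
        have h1 : di + 1 = 2 * (block * cols + c) + 1 := by omega
        simp only [pvG, h1, floordiv_two_odd, mod_two_odd]
        norm_num
        ring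
      by_cases hg1 : di + 1 ≥ n
      · rw [if_pos hg1]
        have hn : n = di + 1 := by omega
        have hmin : min n (di + 2 * ((k : Int) + 1)) = di + 1 := by omega
        rw [hmin, pvSeg_cons _ _ _ _ _ _ (by omega), pvSeg_nil _ _ _ _ _ _ (by omega),
          hx0, max_eq_right (by omega)]
      · rw [if_neg hg1]
        have hdi2 : di + 1 + 1 = 2 * (block * cols + (c + 1)) := by omega
        rw [ih (c + 1) _ _ hdi2]
        have hmeq : min n (di + 1 + 1 + 2 * (k : Int)) = min n (di + 2 * ((k : Int) + 1)) := by
          omega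
        have hle2 : di + 1 + 1 ≤ min n (di + 2 * ((k : Int) + 1)) := by omega
        rw [hmeq]
        refine Prod.ext ?_ ?_
        · simp only
          rw [pvSeg_cons _ _ _ _ _ _ (by omega : di < min n (di + 2 * ((k : Int) + 1))),
            pvSeg_cons _ _ _ _ _ _ (by omega : di + 1 < min n (di + 2 * ((k : Int) + 1))),
            hx0, hx1]
          simp
        · simp only
          omega

-- the while-loop, entered with block = 11 - fuel and desk_index = 2·block·cols (or done),
-- lays out desks up to min(n, 22·cols)
lemma outer_spec (n x_start step_x cols mid_y gap_mid : Int) (hcols : 1 ≤ cols) :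
    ∀ (fuel : Nat), 1 ≤ fuel → fuel ≤ 11 →
    ∀ (ps : List (Int × Int)) (di block : Int), block = 11 - (fuel : Int) →
    (di = 2 * (block * cols) ∨ n ≤ di) →
    layoutOuter n x_start step_x cols mid_y gap_mid fuel ps di block
      = ps ++ pvSeg x_start step_x (mid_y - 3 - PySem.Int.floordiv gap_mid 2)
          (mid_y + PySem.Int.floordiv gap_mid 2) di (max di (min n (22 * cols))) := by
  intro fuel
  induction fuel with
  | zero => intro h1; exact absurd h1 (by norm_num)
  | succ fuel ih =>
    intro _ hle ps di block hblock hdi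
    simp only [layoutOuter]
    by_cases hlt : di < n
    · rw [if_pos hlt]
      have hdib : di = 2 * (block * cols) := by
        rcases hdi with h | h
        · exact h
        · omega
      have hcn : ((cols.toNat : Int)) = cols := by omega
      have hrange : PySem.List.pyRange 0 cols 1
          = (List.range cols.toNat).map (fun t : Nat => (0 : Int) + (t : Int)) := by
        have h := PySem.List.pyRange_zero_natCast cols.toNat
        rw [hcn] at h
        rw [h]
        exact List.map_congr_left fun t _ => by simp
      rw [hrange, inner_spec n x_start step_x cols mid_y gap_mid block cols.toNat 0 ps di
        (by simpa using hdib)]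
      simp only [hcn]
      obtain ⟨q, hq⟩ : ∃ q, block * cols = q := ⟨_, rfl⟩
      rw [hq] at hdib
      have hbc : q ≤ 10 * cols := by
        rw [← hq]
        exact mul_le_mul_of_nonneg_right (by omega : block ≤ 10) (by omega : (0 : Int) ≤ cols)
      by_cases hbk : block + 1 > 10
      · rw [if_pos hbk]
        have hb10 : block = 10 := by omega
        have hq10 : q = 10 * cols := by rw [← hq, hb10]
        have hmeq : min n (di + 2 * cols) = max di (min n (22 * cols)) := by omega
        rw [hmeq]
      · rw [if_neg hbk]
        have hb9 : block ≤ 9 := by omega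
        have hbc9 : q ≤ 9 * cols := by
          rw [← hq]
          exact mul_le_mul_of_nonneg_right (by omega : block ≤ 9) (by omega : (0 : Int) ≤ cols)
        have hnext : max di (min n (di + 2 * cols)) = 2 * ((block + 1) * cols) ∨
            n ≤ max di (min n (di + 2 * cols)) := by
          by_cases hn2 : n ≤ di + 2 * cols
          · right; omega
          · left
            have : max di (min n (di + 2 * cols)) = di + 2 * cols := by omega
            rw [this, hdib, ← hq]
            ring
        rw [ih (by omega) (by omega) _ _ _ (by push_cast at hblock ⊢; omega) hnext]
        have hK : max (max di (min n (di + 2 * cols))) (min n (22 * cols))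
            = min n (22 * cols) := by omega
        have hM : max di (min n (22 * cols)) = min n (22 * cols) := by omega
        have hmid : max di (min n (di + 2 * cols)) = min n (di + 2 * cols) := by omega
        rw [hK, hM, hmid, List.append_assoc,
          pvSeg_append _ _ _ _ _ _ _ (by omega) (by omega)]
    · rw [if_neg hlt]
      rw [pvSeg_nil _ _ _ _ _ _ (by omega), List.append_nil]

-- ===== VERDICT (by name: the statement is the Claim_ definition above) =====
theorem layout_facing_py_spec : Claim_equal_layout_facing_py := by
  intro n x_start x_end y_start y_end _
  unfold Spec_layout_facing_py
  simp only [layout_facing_py, layout_facing_py_alt]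
  rw [outer_spec n x_start (6 + 3) (max 1 (PySem.Int.floordiv (x_end - x_start) (6 + 3)))
    (y_start + PySem.Int.floordiv (y_end - y_start) 2) 1 (le_max_left _ _) 11 (by norm_num)
    (by norm_num) [] 0 0 (by norm_num) (Or.inl (by ring))]
  rw [List.nil_append]
  unfold pvSeg
  have h0 : (0 : Int) ≤ max 0 (min n (22 * max 1 (PySem.Int.floordiv (x_end - x_start) (6 + 3)))) :=
    le_max_left _ _
  have h := PySem.List.pyRange_zero_natCast
    (max 0 (min n (22 * max 1 (PySem.Int.floordiv (x_end - x_start) (6 + 3))))).toNat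
  rw [Int.toNat_of_nonneg h0] at h
  rw [h, List.map_map, sub_zero]
  refine List.map_congr_left fun t _ => ?_
  simp [pvG, Function.comp]
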